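-- pv_equiv track=rewrite | github.com/newcoder99/PythonDSA | LiveCoding/Week4/week4sol1.py | Indegree_Mat
-- ===== SOURCE A (Python) =====
-- def Indegree_Mat(GMat):
--   IndegreeDict={}
--   for i in range(0,len(GMat)):
--     for j in range(0,len(GMat[i])):
--       if(j not in IndegreeDict.keys()):
--         IndegreeDict[j]=0
--       if(GMat[i][j]==1):
--         IndegreeDict[j]=IndegreeDict[j]+1
--
--   return IndegreeDict
-- ===== SOURCE B (Python) =====
-- def Indegree_Mat(GMat):
--   maxlen = max((len(r) for r in GMat), default=0)
--   return {j: sum(1 for r in GMat if len(r) > j and r[j] == 1) for j in range(maxlen)}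
-- ===== Notes on version B (the rewrite author's own statement) =====
-- stated objective: simpler
-- what changed: Replaces A's row-major lazy-insert dict accumulation with a column-major comprehension: compute the max row length once, then for each column j count the rows with a 1 there in one shaped pass.
import Mathlib
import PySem

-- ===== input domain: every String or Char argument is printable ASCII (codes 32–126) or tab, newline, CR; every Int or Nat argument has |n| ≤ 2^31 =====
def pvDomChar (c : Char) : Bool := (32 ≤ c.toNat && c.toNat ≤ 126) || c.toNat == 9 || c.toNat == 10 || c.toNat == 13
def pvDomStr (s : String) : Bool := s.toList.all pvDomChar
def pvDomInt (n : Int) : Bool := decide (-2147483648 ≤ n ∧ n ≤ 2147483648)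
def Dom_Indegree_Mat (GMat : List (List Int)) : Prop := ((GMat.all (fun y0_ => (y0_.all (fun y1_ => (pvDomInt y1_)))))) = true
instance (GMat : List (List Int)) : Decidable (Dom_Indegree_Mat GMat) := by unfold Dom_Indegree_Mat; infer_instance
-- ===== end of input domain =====

-- B computes the indegree dict column-major (max row length once, then one count per column)
-- instead of A's row-major lazy-insert accumulation; objective: simpler. Both are total.

-- ===== PORT A =====
-- second half of A's loop body: if GMat[i][j] == 1 then IndegreeDict[j] = IndegreeDict[j] + 1
def pyBump (row : List Int) (d1 : PySem.Dict Int Int) (j : Nat) : PySem.Dict Int Int :=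
  if row.getD j 0 = 1 then d1.insert (j : Int) (d1.getD (j : Int) 0 + 1) else d1

-- one step of A's inner loop: ensure key j exists (first if), then bump it (second if)
def aStep (row : List Int) (d : PySem.Dict Int Int) (j : Nat) : PySem.Dict Int Int :=
  pyBump row (if d.keys.contains ((j : Int)) then d else d.insert ((j : Int)) 0) j

def Indegree_Mat (GMat : List (List Int)) : List (Int × Int) :=
  (GMat.foldl (fun d row => (List.range row.length).foldl (aStep row) d) PySem.Dict.empty).items

-- ===== PORT B =====
-- sum(1 for r in GMat if len(r) > j and r[j] == 1)
def bCount (GMat : List (List Int)) (j : Nat) : Int :=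
  GMat.foldl (fun acc row => if j < row.length ∧ row.getD j 0 = 1 then acc + 1 else acc) 0

def Indegree_Mat_alt (GMat : List (List Int)) : List (Int × Int) :=
  let maxlen := GMat.foldl (fun m row => max m row.length) 0
  (List.range maxlen).map (fun (j : Nat) => ((j : Int), bCount GMat j))

-- ===== PRECONDITION & SPEC =====
def Spec_Indegree_Mat (GMat : List (List Int)) (out : List (Int × Int)) : Prop := out = Indegree_Mat_alt GMat
instance (GMat : List (List Int)) (out : List (Int × Int)) : Decidable (Spec_Indegree_Mat GMat out) := by unfold Spec_Indegree_Mat; infer_instance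

-- ===== CLAIM (what is proved, stated in full; the proofs are below) =====
def Claim_equal_Indegree_Mat : Prop := ∀ (GMat : List (List Int)), Dom_Indegree_Mat GMat → Spec_Indegree_Mat GMat (Indegree_Mat GMat)

-- ===== LEMMAS AND PROOFS =====

-- canonical shape of A's dict: keys 0..m-1 in order, value c j at key j
def mapdict (m : Nat) (c : Nat → Int) : PySem.Dict Int Int :=
  PySem.Dict.mk ((List.range m).map (fun (j : Nat) => ((j : Int), c j)))

theorem mapdict_congr (m : Nat) (c c' : Nat → Int) (h : ∀ j, j < m → c j = c' j) :
    mapdict m c = mapdict m c' := by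
  unfold mapdict
  congr 1
  apply List.map_congr_left
  intro j hj
  rw [h j (List.mem_range.mp hj)]

theorem mapdict_keys_contains (m : Nat) (c : Nat → Int) (j : Nat) :
    (mapdict m c).keys.contains ((j : Int)) = decide (j < m) := by
  unfold mapdict
  simp [PySem.Dict.keys, List.mem_range]

theorem mapdict_contains (m : Nat) (c : Nat → Int) (j : Nat) :
    (mapdict m c).contains ((j : Int)) = decide (j < m) := by
  rw [PySem.Dict.contains_eq_decide_mem_keys]
  unfold mapdict
  simp [PySem.Dict.keys, List.mem_range]

theorem mapdict_keys_eq (m : Nat) (c : Nat → Int) :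
    (mapdict m c).keys = (List.range m).map (fun (j : Nat) => ((j : Int))) := by
  simp [mapdict, PySem.Dict.keys]

theorem mapdict_nodup (m : Nat) (c : Nat → Int) : (mapdict m c).keys.Nodup := by
  rw [mapdict_keys_eq]
  exact List.nodup_range.map (fun a b h => by exact_mod_cast h)

theorem mapdict_getD (m : Nat) (c : Nat → Int) (j : Nat) (d0 : Int) :
    (mapdict m c).getD ((j : Int)) d0 = if j < m then c j else d0 := by
  by_cases h : j < m
  · rw [if_pos h]
    apply PySem.Dict.getD_of_mem_items _ _ (mapdict_nodup m c)
    unfold mapdict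
    simp only [PySem.Dict.items, List.mem_map, List.mem_range]
    exact ⟨j, h, rfl⟩
  · rw [if_neg h]
    apply PySem.Dict.getD_of_not_contains
    rw [mapdict_contains]
    simpa using h

theorem mapdict_insert_lt (m : Nat) (c : Nat → Int) (j : Nat) (v : Int) (h : j < m) :
    (mapdict m c).insert ((j : Int)) v = mapdict m (fun i => if i = j then v else c i) := by
  apply PySem.Dict.ext
  rw [PySem.Dict.items_insert_of_contains]
  · unfold mapdict
    simp only [PySem.Dict.items, List.map_map]
    apply List.map_congr_left
    intro i hi
    by_cases hij : i = j
    · subst hij; simp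
    · have hb : (((i : Int)) == ((j : Int))) = false := by
        simp [Int.natCast_inj]
        omega
      simp [Function.comp, hb, hij]
  · rw [mapdict_contains]
    simpa using h

theorem mapdict_insert_eq (m : Nat) (c : Nat → Int) (v : Int) :
    (mapdict m c).insert ((m : Int)) v = mapdict (m + 1) (fun i => if i = m then v else c i) := by
  apply PySem.Dict.ext
  rw [PySem.Dict.items_insert_of_not_contains]
  · unfold mapdict
    simp only [PySem.Dict.items, List.range_succ, List.map_append]
    congr 1
    · apply List.map_congr_left
      intro i hi
      have hne : i ≠ m := Nat.ne_of_lt (List.mem_range.mp hi)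
      simp [hne]
    · simp
  · rw [mapdict_contains]
    simp

theorem pyBump_mapdict (row : List Int) (M : Nat) (c : Nat → Int) (j : Nat) (hj : j < M) :
    pyBump row (mapdict M c) j =
      mapdict M (fun i => if i = j ∧ row.getD j 0 = 1 then c j + 1 else c i) := by
  unfold pyBump
  by_cases hv : row.getD j 0 = 1
  · rw [if_pos hv, mapdict_getD, if_pos hj, mapdict_insert_lt _ _ _ _ hj]
    apply mapdict_congr
    intro i hi
    by_cases hij : i = j
    · rw [if_pos hij, if_pos ⟨hij, hv⟩]
    · rw [if_neg hij, if_neg (fun h => hij h.1)]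
  · rw [if_neg hv]
    apply mapdict_congr
    intro i hi
    rw [if_neg (fun h => hv h.2)]

-- one inner-loop run of A, from a canonical dict, yields a canonical dict
theorem inner_loop (row : List Int) (n m : Nat) (c : Nat → Int) :
    (List.range n).foldl (aStep row) (mapdict m c) =
      mapdict (max m n) (fun j =>
        (if j < m then c j else 0) + (if j < n ∧ row.getD j 0 = 1 then 1 else 0)) := by
  induction n with
  | zero =>
      simp only [List.range_zero, List.foldl_nil, Nat.max_zero]
      apply mapdict_congr
      intro j hj
      rw [if_pos hj, if_neg (fun h => Nat.not_lt_zero j h.1)]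
      ring
  | succ n ih =>
      rw [List.range_succ, List.foldl_append, List.foldl_cons, List.foldl_nil, ih]
      unfold aStep
      by_cases hm : n < m
      · have hmax : max m n = m := Nat.max_eq_left (Nat.le_of_lt hm)
        have hmax' : max m (n + 1) = m := Nat.max_eq_left hm
        rw [hmax, hmax', mapdict_keys_contains]
        have hc : (decide (n < m)) = true := by simpa using hm
        rw [hc, if_pos rfl, pyBump_mapdict _ _ _ _ hm]
        apply mapdict_congr
        intro j hj
        have e1 : ¬ (n < n ∧ row.getD n 0 = 1) := fun h => Nat.lt_irrefl n h.1
        by_cases hjn : j = n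
        · subst hjn
          simp only [Nat.lt_irrefl, Nat.lt_add_one, eq_self_iff_true, true_and, false_and,
            if_true, if_false, hm]
          split_ifs <;> ring
        · have h1 : (j < n ∧ row.getD j 0 = 1) ↔ (j < n + 1 ∧ row.getD j 0 = 1) := by
            constructor
            · rintro ⟨h, h2⟩; exact ⟨Nat.lt_succ_of_lt h, h2⟩
            · rintro ⟨h, h2⟩; exact ⟨Nat.lt_of_le_of_ne (Nat.lt_succ_iff.mp h) hjn, h2⟩
          have h2 : ¬ (j = n ∧ row.getD n 0 = 1) := fun h => hjn h.1
          rw [if_neg h2, if_congr h1 rfl rfl]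
      · have hmn : m ≤ n := Nat.le_of_not_lt hm
        have hmax : max m n = n := Nat.max_eq_right hmn
        have hmax' : max m (n + 1) = n + 1 := Nat.max_eq_right (Nat.le_succ_of_le hmn)
        rw [hmax, hmax', mapdict_keys_contains]
        have hc : (decide (n < n)) = false := by simp
        rw [hc]
        simp only [Bool.false_eq_true, if_false]
        rw [mapdict_insert_eq, pyBump_mapdict _ _ _ _ (Nat.lt_succ_self n)]
        apply mapdict_congr
        intro j hj
        by_cases hjn : j = n
        · subst hjn
          simp only [Nat.lt_irrefl, Nat.lt_add_one, eq_self_iff_true, true_and, false_and,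
            if_true, if_false, hm]
          split_ifs <;> ring
        · have h1 : (j < n ∧ row.getD j 0 = 1) ↔ (j < n + 1 ∧ row.getD j 0 = 1) := by
            constructor
            · rintro ⟨h, h2⟩; exact ⟨Nat.lt_succ_of_lt h, h2⟩
            · rintro ⟨h, h2⟩; exact ⟨Nat.lt_of_le_of_ne (Nat.lt_succ_iff.mp h) hjn, h2⟩
          have h2 : ¬ (j = n ∧ row.getD n 0 = 1) := fun h => hjn h.1
          rw [if_neg h2, if_neg hjn, if_congr h1 rfl rfl]

theorem bCount_shift (rows : List (List Int)) (j : Nat) (a : Int) :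
    rows.foldl (fun acc row => if j < row.length ∧ row.getD j 0 = 1 then acc + 1 else acc) a
      = a + rows.foldl (fun acc row => if j < row.length ∧ row.getD j 0 = 1 then acc + 1 else acc) 0 := by
  induction rows generalizing a with
  | nil => simp
  | cons r rows ih =>
      simp only [List.foldl_cons]
      rw [ih, ih (if j < r.length ∧ r.getD j 0 = 1 then (0:Int) + 1 else 0)]
      split_ifs <;> ring

theorem bCount_cons (r : List Int) (rows : List (List Int)) (j : Nat) :
    bCount (r :: rows) j =
      (if j < r.length ∧ r.getD j 0 = 1 then (1:Int) else 0) + bCount rows j := by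
  unfold bCount
  simp only [List.foldl_cons]
  rw [bCount_shift]
  split_ifs <;> ring

theorem outer_loop (rows : List (List Int)) (m : Nat) (c : Nat → Int) :
    rows.foldl (fun d row => (List.range row.length).foldl (aStep row) d) (mapdict m c) =
      mapdict (rows.foldl (fun a r => max a r.length) m)
        (fun j => (if j < m then c j else 0) + bCount rows j) := by
  induction rows generalizing m c with
  | nil =>
      simp only [List.foldl_nil]
      apply mapdict_congr
      intro j hj
      simp [bCount, hj]
  | cons r rows ih =>
      simp only [List.foldl_cons]
      rw [inner_loop, ih]
      apply mapdict_congr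
      intro j hj
      rw [bCount_cons]
      by_cases hjm : j < max m r.length
      · rw [if_pos hjm]; ring
      · rw [if_neg hjm]
        have h1 : ¬ j < m := fun h => hjm (Nat.lt_of_lt_of_le h (Nat.le_max_left _ _))
        have h2 : ¬ j < r.length := fun h => hjm (Nat.lt_of_lt_of_le h (Nat.le_max_right _ _))
        have h3 : ¬ (j < r.length ∧ r.getD j 0 = 1) := fun h => h2 h.1
        rw [if_neg h1, if_neg h3]
        ring

-- ===== VERDICT (by name: the statement is the Claim_ definition above) =====
theorem Indegree_Mat_spec : Claim_equal_Indegree_Mat := by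
  intro GMat _
  show Indegree_Mat GMat = Indegree_Mat_alt GMat
  unfold Indegree_Mat Indegree_Mat_alt
  have h0 : (PySem.Dict.empty : PySem.Dict Int Int) = mapdict 0 (fun _ => 0) := rfl
  rw [h0, outer_loop]
  unfold mapdict
  apply List.map_congr_left
  intro j hj
  simp
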